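-- pv_equiv track=rewrite | github.com/maxpattmanqa/qa-python-exercises | exercises/exercise_3.py | stringtest
-- ===== SOURCE A (Python) =====
-- import copy
--
-- def stringtest(string_1,string_2):
-- # loop through string 2 and remove each letter and compare to string 1
--     index = 0
--     str_2_list = list(string_2)
--
--     while index < len(string_2):
--         #remove from list
--         comparitor_list = copy.copy(str_2_list)
--         comparitor_list.pop(index)
--         comparitor_str =  "".join(comparitor_list)
--         if (comparitor_str == string_1):
--             return True
--
--         index = index +1
--
--     return False
-- ===== SOURCE B (Python) =====
-- def stringtest(string_1, string_2):
--     # Two-pointer: string_2 must be one char longer; skip the first mismatch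
--     # and compare the remaining suffixes.
--     if len(string_2) != len(string_1) + 1:
--         return False
--     i = 0
--     while i < len(string_1) and string_1[i] == string_2[i]:
--         i += 1
--     return string_2[i + 1:] == string_1[i:]
-- ===== Notes on version B (the rewrite author's own statement) =====
-- stated objective: faster
-- what changed: Replaces the try-every-deletion loop (copying and rejoining string_2 for each index) with a single two-pointer pass: require len(string_2)==len(string_1)+1, advance to the first mismatch, and compare the suffixes after skipping that one character.
import Mathlib
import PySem

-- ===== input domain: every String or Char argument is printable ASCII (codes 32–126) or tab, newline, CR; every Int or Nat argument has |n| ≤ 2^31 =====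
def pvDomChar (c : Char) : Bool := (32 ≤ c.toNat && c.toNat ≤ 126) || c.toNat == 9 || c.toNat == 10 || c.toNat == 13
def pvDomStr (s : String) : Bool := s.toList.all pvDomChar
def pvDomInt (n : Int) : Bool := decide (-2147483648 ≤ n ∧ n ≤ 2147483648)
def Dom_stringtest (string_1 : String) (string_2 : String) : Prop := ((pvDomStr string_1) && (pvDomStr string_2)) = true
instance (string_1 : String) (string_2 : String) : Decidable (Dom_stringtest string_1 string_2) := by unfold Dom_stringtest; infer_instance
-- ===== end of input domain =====

-- B replaces A's try-every-deletion loop with a single two-pointer pass (length check, first mismatch, suffix compare); objective: faster by algorithm change.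
-- ===== PORT A =====
-- the 'while index < len(string_2)' loop; fuel = len(string_2) - index
def stringtestWhile (string_1 : List Char) (str_2_list : List Char) (index : Nat) (fuel : Nat) : Bool :=
  match fuel with
  | 0 => false                                   -- index ≥ len(string_2): fall through to 'return False'
  | fuel' + 1 =>
    -- comparitor_list = copy of str_2_list with element at `index` popped (index is in range here)
    let comparitor_list := str_2_list.eraseIdx index
    if comparitor_list = string_1 then true
    else stringtestWhile string_1 str_2_list (index + 1) fuel'

def stringtest (string_1 : String) (string_2 : String) : Bool :=
  stringtestWhile string_1.toList string_2.toList 0 string_2.toList.length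

-- ===== PORT B =====
-- 'while i < len(string_1) and string_1[i] == string_2[i]: i += 1'
def firstMismatch (l1 : List Char) (l2 : List Char) : Nat :=
  match l1, l2 with
  | a :: t1, b :: t2 => if a = b then firstMismatch t1 t2 + 1 else 0
  | _, _ => 0

def stringtest_alt (string_1 : String) (string_2 : String) : Bool :=
  let l1 := string_1.toList
  let l2 := string_2.toList
  if l2.length ≠ l1.length + 1 then false
  else
    let i := firstMismatch l1 l2
    decide (l2.drop (i + 1) = l1.drop i)   -- string_2[i+1:] == string_1[i:] (nonnegative slices = drop)

-- ===== PRECONDITION & SPEC =====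
def Spec_stringtest (string_1 : String) (string_2 : String) (out : Bool) : Prop := out = stringtest_alt string_1 string_2
instance (string_1 : String) (string_2 : String) (out : Bool) : Decidable (Spec_stringtest string_1 string_2 out) := by unfold Spec_stringtest; infer_instance

-- ===== CLAIM (what is proved, stated in full; the proofs are below) =====
def Claim_equal_stringtest : Prop := ∀ (string_1 : String) (string_2 : String), Dom_stringtest string_1 string_2 → Spec_stringtest string_1 string_2 (stringtest string_1 string_2)

-- ===== LEMMAS AND PROOFS =====

-- ===== VERDICT (by name: the statement is the Claim_ definition above) =====
-- A's while loop decides: some deletion position ≥ index works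
theorem whileA_iff (l1 l2 : List Char) : ∀ (fuel index : Nat), index + fuel = l2.length →
    (stringtestWhile l1 l2 index fuel = true ↔ ∃ j, index ≤ j ∧ j < l2.length ∧ l2.eraseIdx j = l1) := by
  intro fuel
  induction fuel with
  | zero =>
    intro index h
    simp only [stringtestWhile]
    constructor
    · intro hc; cases hc
    · rintro ⟨j, hij, hjl, _⟩; omega
  | succ n ih =>
    intro index h
    simp only [stringtestWhile]
    split
    · rename_i heq
      constructor
      · intro _; exact ⟨index, le_refl _, by omega, heq⟩
      · intro _; rfl
    · rename_i hne
      rw [ih (index + 1) (by omega)]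
      constructor
      · rintro ⟨j, hij, hjl, he⟩; exact ⟨j, by omega, hjl, he⟩
      · rintro ⟨j, hij, hjl, he⟩
        refine ⟨j, ?_, hjl, he⟩
        rcases Nat.eq_or_lt_of_le hij with rfl | hlt
        · exact absurd he hne
        · omega

-- the two-pointer condition is equivalent to "some deletion works"
theorem mismatch_iff (l1 l2 : List Char) :
    (∃ j, j < l2.length ∧ l2.eraseIdx j = l1) ↔
      (l2.length = l1.length + 1 ∧
        l2.drop (firstMismatch l1 l2 + 1) = l1.drop (firstMismatch l1 l2)) := by
  induction l2 generalizing l1 with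
  | nil =>
    simp [firstMismatch]
  | cons b t2 ih =>
    cases l1 with
    | nil =>
      simp only [firstMismatch, List.length_cons, List.length_nil, List.drop, List.drop_zero]
      constructor
      · rintro ⟨j, hj, he⟩
        cases j with
        | zero => simp at he; simp [he]
        | succ k => simp [List.eraseIdx_cons_succ] at he
      · rintro ⟨h1, _⟩
        have : t2 = [] := List.length_eq_zero_iff.mp (by omega)
        exact ⟨0, by simp, by simp [this]⟩
    | cons a t1 =>
      by_cases hab : a = b
      · subst hab
        have hrw : (∃ j, j < (a :: t2).length ∧ (a :: t2).eraseIdx j = a :: t1) ↔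
            (∃ j, j < t2.length ∧ t2.eraseIdx j = t1) := by
          constructor
          · rintro ⟨j, hj, he⟩
            cases j with
            | zero =>
              simp only [List.eraseIdx_cons_zero] at he
              subst he
              exact ⟨0, by simp, by simp⟩
            | succ k =>
              simp only [List.eraseIdx_cons_succ, List.cons.injEq] at he
              exact ⟨k, by simpa using hj, he.2⟩
          · rintro ⟨j, hj, he⟩
            exact ⟨j + 1, by simpa using Nat.succ_lt_succ hj, by simp [List.eraseIdx_cons_succ, he]⟩
        rw [hrw, ih t1]
        simp only [firstMismatch, List.length_cons]
        constructor
        · rintro ⟨h1, h2⟩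
          exact ⟨by omega, by simpa [List.drop] using h2⟩
        · rintro ⟨h1, h2⟩
          exact ⟨by omega, by simpa [List.drop] using h2⟩
      · simp only [firstMismatch, if_neg hab]
        constructor
        · rintro ⟨j, hj, he⟩
          cases j with
          | zero =>
            simp only [List.eraseIdx_cons_zero] at he
            subst he
            simp
          | succ k =>
            simp only [List.eraseIdx_cons_succ, List.cons.injEq] at he
            exact absurd he.1.symm hab
        · rintro ⟨h1, h2⟩
          have ht : t2 = a :: t1 := by simpa using h2
          exact ⟨0, by simp, by simp [ht]⟩

theorem stringtest_iff (s1 s2 : String) :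
    stringtest s1 s2 = true ↔ stringtest_alt s1 s2 = true := by
  unfold stringtest
  rw [whileA_iff _ _ _ 0 (by omega)]
  have halt : stringtest_alt s1 s2 =
      (if s2.toList.length ≠ s1.toList.length + 1 then false
       else decide (s2.toList.drop (firstMismatch s1.toList s2.toList + 1) =
                    s1.toList.drop (firstMismatch s1.toList s2.toList))) := rfl
  rw [halt]
  split
  · rename_i hlen
    simp only [Bool.false_eq_true, iff_false]
    rintro ⟨j, _, hj, he⟩
    have := List.length_eraseIdx_of_lt hj
    rw [he] at this
    omega
  · rename_i hlen
    push_neg at hlen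
    rw [decide_eq_true_iff]
    rw [show (∃ j, 0 ≤ j ∧ j < s2.toList.length ∧ s2.toList.eraseIdx j = s1.toList) ↔
        (∃ j, j < s2.toList.length ∧ s2.toList.eraseIdx j = s1.toList) from
      ⟨fun ⟨j, _, h2, h3⟩ => ⟨j, h2, h3⟩, fun ⟨j, h2, h3⟩ => ⟨j, Nat.zero_le _, h2, h3⟩⟩]
    rw [mismatch_iff]
    exact ⟨fun h => h.2, fun h => ⟨hlen, h⟩⟩

theorem stringtest_spec : Claim_equal_stringtest := by
  intro s1 s2 _
  unfold Spec_stringtest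
  have := stringtest_iff s1 s2
  cases h1 : stringtest s1 s2 <;> cases h2 : stringtest_alt s1 s2 <;> simp_all
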